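-- pv_equiv track=rewrite | github.com/aaplatform/SkillupAlgorithm2018 | src/pskim/q12930/buildWeirdStr/__init__.py | solution
-- ===== SOURCE A (Python) =====
-- def solution(s):
--     isOdd=1
--     answer=[]
--
--     for c in s:
--         if c.isalpha():
--             answer.append(c.upper() if isOdd%2!=0 else c.lower())
--             isOdd+=1
--         else:
--             answer.append(c)
--             isOdd=1
--
--     return "".join(answer)
-- ===== SOURCE B (Python) =====
-- def solution(s):
--     res = []
--     i = 0
--     n = len(s)
--     while i < n:
--         if s[i].isalpha():
--             j = i
--             while j < n and s[j].isalpha():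
--                 j += 1
--             run = s[i:j]
--             res.append(''.join(c.upper() if k % 2 == 0 else c.lower() for k, c in enumerate(run)))
--             i = j
--         else:
--             res.append(s[i])
--             i += 1
--     return ''.join(res)
-- ===== Notes on version B (the rewrite author's own statement) =====
-- stated objective: alternative
-- what changed: B partitions the string into maximal alphabetic runs (run detection + per-run enumerate alternation starting uppercase at index 0) instead of A's single pass with a reset counter carried across characters.
import Mathlib
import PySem

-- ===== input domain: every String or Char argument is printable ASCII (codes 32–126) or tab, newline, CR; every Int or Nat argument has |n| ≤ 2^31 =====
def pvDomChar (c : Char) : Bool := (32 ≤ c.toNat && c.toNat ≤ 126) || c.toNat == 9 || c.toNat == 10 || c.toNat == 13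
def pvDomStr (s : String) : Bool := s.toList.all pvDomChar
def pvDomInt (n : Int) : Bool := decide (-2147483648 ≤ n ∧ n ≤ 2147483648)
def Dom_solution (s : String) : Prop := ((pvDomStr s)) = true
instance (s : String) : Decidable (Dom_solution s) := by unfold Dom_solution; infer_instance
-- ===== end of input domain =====

-- B restructures A: maximal alphabetic runs with per-run alternation, instead of A's reset counter; same output, same cost.

-- ===== PORT A =====
-- one loop step of A: state is (answer, isOdd)
def stepA (st : List Char × Int) (c : Char) : List Char × Int :=
  if PySem.Chars.isalpha c then
    (st.1 ++ [if PySem.Int.mod st.2 2 ≠ 0 then PySem.Chars.upperChar c else PySem.Chars.lowerChar c], st.2 + 1)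
  else
    (st.1 ++ [c], 1)

def solution (s : String) : String :=
  String.ofList (s.toList.foldl stepA ([], 1)).1

-- ===== PORT B =====
-- per-run alternation: index k, 0-based, even ↦ upper
def procRun : List Char → Nat → List Char
  | [], _ => []
  | c :: cs, k =>
    (if k % 2 = 0 then PySem.Chars.upperChar c else PySem.Chars.lowerChar c) :: procRun cs (k + 1)

-- scan: on an alphabetic head, take the maximal alphabetic run, process it, continue after the run
def altGo : List Char → List Char
  | [] => []
  | c :: cs =>
    if h : PySem.Chars.isalpha c = true then
      procRun ((c :: cs).takeWhile PySem.Chars.isalpha) 0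
        ++ altGo ((c :: cs).dropWhile PySem.Chars.isalpha)
    else
      c :: altGo cs
termination_by cs => cs.length
decreasing_by
  · rw [List.dropWhile_cons_of_pos h]
    exact Nat.lt_succ_of_le (List.length_dropWhile_le _ _)
  · simp

def solution_alt (s : String) : String := String.ofList (altGo s.toList)

-- ===== PRECONDITION & SPEC =====
def Spec_solution (s : String) (out : String) : Prop := out = solution_alt s
instance (s : String) (out : String) : Decidable (Spec_solution s out) := by unfold Spec_solution; infer_instance

-- ===== CLAIM (what is proved, stated in full; the proofs are below) =====
def Claim_equal_solution : Prop := ∀ (s : String), Dom_solution s → Spec_solution s (solution s)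

-- ===== LEMMAS AND PROOFS =====

-- A's loop in structural-recursion form
def goA : List Char → Int → List Char
  | [], _ => []
  | c :: cs, k =>
    if PySem.Chars.isalpha c then
      (if PySem.Int.mod k 2 ≠ 0 then PySem.Chars.upperChar c else PySem.Chars.lowerChar c) :: goA cs (k + 1)
    else
      c :: goA cs 1

lemma foldl_stepA (cs : List Char) : ∀ (acc : List Char) (k : Int),
    (cs.foldl stepA (acc, k)).1 = acc ++ goA cs k := by
  induction cs with
  | nil => intro acc k; simp [goA]
  | cons c cs ih =>
    intro acc k
    by_cases h : PySem.Chars.isalpha c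
    · simp only [List.foldl_cons, stepA, if_pos h, goA, ih, List.append_assoc,
        List.singleton_append]
    · simp only [List.foldl_cons, stepA, if_neg h, goA, ih, List.append_assoc,
        List.singleton_append]

lemma altGo_run (cs : List Char) :
    altGo cs = procRun (cs.takeWhile PySem.Chars.isalpha) 0
      ++ altGo (cs.dropWhile PySem.Chars.isalpha) := by
  cases cs with
  | nil => simp [altGo, procRun]
  | cons c cs =>
    by_cases h : PySem.Chars.isalpha c = true
    · conv_lhs => rw [altGo]
      rw [dif_pos h]
    · conv_lhs => rw [altGo]
      rw [dif_neg h, List.takeWhile_cons_of_neg h, List.dropWhile_cons_of_neg h]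
      conv_rhs => rw [altGo]
      rw [dif_neg h]
      simp [procRun]

lemma goA_eq (cs : List Char) : ∀ (n : Nat),
    goA cs ((n : Int) + 1)
      = procRun (cs.takeWhile PySem.Chars.isalpha) n
        ++ altGo (cs.dropWhile PySem.Chars.isalpha) := by
  induction cs with
  | nil => intro n; simp [goA, procRun, altGo]
  | cons c cs ih =>
    intro n
    by_cases h : PySem.Chars.isalpha c = true
    · rw [goA, if_pos h, List.takeWhile_cons_of_pos h, List.dropWhile_cons_of_pos h]
      simp only [procRun, List.cons_append]
      have hm : PySem.Int.mod ((n : Int) + 1) 2 = (((n + 1) % 2 : Nat) : Int) := by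
        have := PySem.Int.mod_natCast (n + 1) 2
        push_cast at this ⊢
        exact this
      have hcond : (PySem.Int.mod ((n : Int) + 1) 2 ≠ 0) ↔ (n % 2 = 0) := by
        rw [hm]; omega
      have hk : (n : Int) + 1 + 1 = ((n + 1 : Nat) : Int) + 1 := by push_cast; ring
      rw [hk, ih (n + 1)]
      congr 1
      by_cases hn : n % 2 = 0
      · rw [if_pos (hcond.mpr hn), if_pos hn]
      · rw [if_neg (fun hc => hn (hcond.mp hc)), if_neg hn]
    · rw [goA, if_neg h, List.takeWhile_cons_of_neg h, List.dropWhile_cons_of_neg h]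
      simp only [procRun, List.nil_append]
      conv_rhs => rw [altGo]
      rw [dif_neg h]
      congr 1
      have h1 : goA cs ((0 : Nat) + 1 : Int) = procRun (cs.takeWhile PySem.Chars.isalpha) 0
          ++ altGo (cs.dropWhile PySem.Chars.isalpha) := ih 0
      norm_num at h1
      rw [h1, ← altGo_run]

lemma goA_one (cs : List Char) : goA cs 1 = altGo cs := by
  have h1 := goA_eq cs 0
  norm_num at h1
  rw [h1, ← altGo_run]

-- ===== VERDICT (by name: the statement is the Claim_ definition above) =====
theorem solution_spec : Claim_equal_solution := by
  intro s _
  unfold Spec_solution solution solution_alt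
  rw [foldl_stepA, goA_one]
  simp
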